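-- pv_equiv track=rewrite | github.com/varvarakoshman/algorithms_workout_python | leetcode/medium/TimeBasedKeyValueStore.py | get_closest_value
-- ===== SOURCE A (Python) =====
-- def get_closest_value(timestamp_tuples, target):
--     left, right = 0, len(timestamp_tuples) - 1
--     result = ""
--     while left <= right:
--         middle = (left + right) // 2
--         if timestamp_tuples[middle][1] <= target:
--             left = middle + 1
--             result = timestamp_tuples[middle][0]
--         else:
--             right = middle - 1
--     return result
-- ===== SOURCE B (Python) =====
-- def get_closest_value(timestamp_tuples, target):
--     def descend(segment):
--         if not segment:
--             return None
--         m = (len(segment) - 1) // 2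
--         key, timestamp = segment[m]
--         if timestamp <= target:
--             later = descend(segment[m + 1:])
--             return later if later is not None else key
--         return descend(segment[:m])
--     found = descend(timestamp_tuples)
--     return found if found is not None else ""
-- ===== Notes on version B (the rewrite author's own statement) =====
-- stated objective: alternative
-- what changed: Replaces the index-based iterative binary search with a string accumulator by a divide-and-conquer recursion on list slices returning Optional[str]: each call splits its slice at the midpoint element, descends into the upper or lower sub-slice, and materialises the midpoint key only when the upper descent comes back empty; no indices or accumulator are threaded.
import Mathlib
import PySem

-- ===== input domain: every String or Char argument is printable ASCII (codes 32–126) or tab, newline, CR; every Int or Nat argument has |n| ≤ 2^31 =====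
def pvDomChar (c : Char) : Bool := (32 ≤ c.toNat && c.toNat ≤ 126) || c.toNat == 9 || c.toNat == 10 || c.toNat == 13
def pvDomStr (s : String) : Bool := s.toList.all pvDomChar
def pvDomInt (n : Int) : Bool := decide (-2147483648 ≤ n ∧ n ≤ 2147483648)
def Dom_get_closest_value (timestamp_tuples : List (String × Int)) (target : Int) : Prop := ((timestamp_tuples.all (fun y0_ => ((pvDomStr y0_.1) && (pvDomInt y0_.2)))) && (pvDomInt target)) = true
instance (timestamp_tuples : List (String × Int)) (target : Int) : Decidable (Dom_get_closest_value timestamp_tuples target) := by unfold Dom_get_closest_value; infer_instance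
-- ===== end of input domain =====

-- B replaces the index-based iterative binary search with an accumulator by a
-- divide-and-conquer recursion on list slices returning an Option; same values everywhere.

-- ===== PORT A =====
-- A's while loop: state (left, right, result); every probed index is in range,
-- so pyGetD's default ("", 0) is never used.
def getClosestLoop (timestamp_tuples : List (String × Int)) (target left right : Int)
    (result : String) : String :=
  if h : left ≤ right then
    let middle := PySem.Int.floordiv (left + right) 2
    let p := PySem.List.pyGetD timestamp_tuples middle ("", 0)
    if p.2 ≤ target then
      getClosestLoop timestamp_tuples target (middle + 1) right p.1
    else
      getClosestLoop timestamp_tuples target left (middle - 1) result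
  else result
termination_by (right - left + 1).toNat
decreasing_by
  · have := PySem.Int.floordiv_two_mid_bounds h
    omega
  · have := PySem.Int.floordiv_two_mid_bounds h
    omega

def get_closest_value (timestamp_tuples : List (String × Int)) (target : Int) : String :=
  getClosestLoop timestamp_tuples target 0 (timestamp_tuples.length - 1) ""

-- ===== PORT B =====
-- B's descend(segment): split the slice at its midpoint element, recurse into the
-- upper or lower sub-slice (segment[m+1:] / segment[:m] become drop / take)
def descendAlt (target : Int) (segment : List (String × Int)) : Option String :=
  if hseg : segment.isEmpty then none
  else
    let m := (segment.length - 1) / 2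
    let p := segment.getD m ("", 0)
    if p.2 ≤ target then
      match descendAlt target (segment.drop (m + 1)) with
      | some later => some later
      | none => some p.1
    else
      descendAlt target (segment.take m)
termination_by segment.length
decreasing_by
  · have : segment.length ≠ 0 := by simpa [List.isEmpty_iff_length_eq_zero] using hseg
    simp; omega
  · have : segment.length ≠ 0 := by simpa [List.isEmpty_iff_length_eq_zero] using hseg
    simp; omega

def get_closest_value_alt (timestamp_tuples : List (String × Int)) (target : Int) : String :=
  match descendAlt target timestamp_tuples with
  | some found => found
  | none => ""

-- ===== PRECONDITION & SPEC =====
def Spec_get_closest_value (timestamp_tuples : List (String × Int)) (target : Int) (out : String) : Prop := out = get_closest_value_alt timestamp_tuples target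
instance (timestamp_tuples : List (String × Int)) (target : Int) (out : String) : Decidable (Spec_get_closest_value timestamp_tuples target out) := by unfold Spec_get_closest_value; infer_instance

-- ===== CLAIM =====
def Claim_equal_get_closest_value : Prop := ∀ (timestamp_tuples : List (String × Int)) (target : Int), Dom_get_closest_value timestamp_tuples target → Spec_get_closest_value timestamp_tuples target (get_closest_value timestamp_tuples target)

-- ===== LEMMAS AND PROOFS =====

-- the midpoint index, slice-relative
theorem floordiv_mid (lo hi : Int) (hlh : lo ≤ hi) :
    PySem.Int.floordiv (lo + hi) 2 = lo + (((hi - lo).toNat : Int) / 2) := by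
  rw [PySem.Int.floordiv, Int.fdiv_eq_ediv]
  omega

-- the loop on the index window [lo, hi] computes the descent on the corresponding slice,
-- with `result` as the value used when the descent comes back empty
theorem loop_eq_descend (tt : List (String × Int)) (t : Int) :
    ∀ lo hi : Int, ∀ result : String, 0 ≤ lo → hi < (tt.length : Int) →
    getClosestLoop tt t lo hi result
      = (descendAlt t ((tt.drop lo.toNat).take (hi - lo + 1).toNat)).getD result := by
  intro lo hi
  induction hn : (hi - lo + 1).toNat using Nat.strong_induction_on generalizing lo hi with
  | _ n ih =>
  intro result hlo hhi
  rw [← hn, getClosestLoop]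
  by_cases h : lo ≤ hi
  · rw [dif_pos h]
    set seg := (tt.drop lo.toNat).take (hi - lo + 1).toNat with hsegdef
    have hlen : seg.length = (hi - lo + 1).toNat := by
      simp [hsegdef]; omega
    set m : Nat := (hi - lo).toNat / 2 with hmdef
    have hm : (seg.length - 1) / 2 = m := by omega
    have hmid : PySem.Int.floordiv (lo + hi) 2 = lo + (m : Int) := by
      rw [floordiv_mid lo hi h]; omega
    have hmlt : m < seg.length := by omega
    have hmtt : lo.toNat + m < tt.length := by omega
    -- the probed pair is the same on both sides
    have hgetA : PySem.List.pyGetD tt (lo + (m : Int)) ("", 0)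
        = tt.getD (lo.toNat + m) ("", 0) := by
      rw [PySem.List.pyGetD_eq_getElem tt ("", 0) (by omega) (by omega)]
      simp [List.getD_eq_getElem?_getD, hmtt,
        show (lo + (m : Int)).toNat = lo.toNat + m by omega]
    have hgetB : seg.getD m ("", 0) = tt.getD (lo.toNat + m) ("", 0) := by
      rw [List.getD_eq_getElem?_getD, List.getElem?_eq_getElem hmlt,
        List.getD_eq_getElem?_getD, List.getElem?_eq_getElem hmtt]
      simp [hsegdef]
    -- the two sub-slices
    have hdropseg : seg.drop (m + 1)
        = (tt.drop (lo + (m : Int) + 1).toNat).take (hi - (lo + (m : Int) + 1) + 1).toNat := by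
      rw [hsegdef, List.drop_take, List.drop_drop]
      congr 1
      · omega
      · congr 1
        omega
    have htakeseg : seg.take m
        = (tt.drop lo.toNat).take (lo + (m : Int) - 1 - lo + 1).toNat := by
      rw [hsegdef, List.take_take]
      congr 1
      omega
    have h0 : seg.length ≠ 0 := by omega
    have hne : ¬ (seg.isEmpty = true) := fun hE =>
      h0 (by simpa [List.isEmpty_iff_length_eq_zero] using hE)
    rw [descendAlt, dif_neg hne]
    simp only [hm, hmid, hgetA, hgetB]
    have IH1 : getClosestLoop tt t (lo + (m : Int) + 1) hi (tt.getD (lo.toNat + m) ("", 0)).1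
        = (descendAlt t ((tt.drop (lo + (m : Int) + 1).toNat).take
            (hi - (lo + (m : Int) + 1) + 1).toNat)).getD (tt.getD (lo.toNat + m) ("", 0)).1 :=
      ih _ (by omega) (lo + (m : Int) + 1) hi rfl _ (by omega) hhi
    have IH2 : getClosestLoop tt t lo (lo + (m : Int) - 1) result
        = (descendAlt t ((tt.drop lo.toNat).take
            (lo + (m : Int) - 1 - lo + 1).toNat)).getD result :=
      ih _ (by omega) lo (lo + (m : Int) - 1) rfl _ hlo (by omega)
    by_cases hc : (tt.getD (lo.toNat + m) ("", 0)).2 ≤ t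
    · rw [if_pos hc, if_pos hc, IH1, ← hdropseg]
      cases descendAlt t (seg.drop (m + 1)) <;> simp
    · rw [if_neg hc, if_neg hc, IH2, ← htakeseg]
  · rw [dif_neg h]
    rw [show (hi - lo + 1).toNat = 0 by omega]
    simp [descendAlt]

-- ===== VERDICT =====
theorem get_closest_value_spec : Claim_equal_get_closest_value := by
  intro tt target _
  unfold Spec_get_closest_value get_closest_value get_closest_value_alt
  rw [loop_eq_descend tt target 0 ((tt.length : Int) - 1) "" le_rfl (by omega)]
  have : ((tt.length : Int) - 1 - 0 + 1).toNat = tt.length := by omega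
  rw [this]
  simp
  cases descendAlt target tt <;> rfl
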